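-- pv_equiv track=rewrite | github.com/crewday/crewday | scripts/refresh_disposable_domains.py | _split_header_and_domains
-- ===== SOURCE A (Python) =====
-- def _is_header_line(line: str) -> bool:
--     """Return True for lines that belong to the leading header block.
--
--     The header block is everything from the start of the file up to
--     (but not including) the first non-comment / non-blank line — i.e.
--     the first domain entry. We treat any line starting with ``#`` or
--     consisting only of whitespace as part of the header.
--     """
--     stripped = line.strip()
--     return stripped == "" or stripped.startswith("#")
--
-- def _split_header_and_domains(text: str) -> tuple[list[str], set[str]]:
--     """Split an existing file into (header_lines, domain_set).
--
--     The first line is dropped from ``header_lines`` because the caller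
--     will rewrite it with the freshly-generated date pin. The remaining
--     header lines are returned verbatim so explanatory comments and
--     blank spacing are preserved across refreshes.
--     """
--     lines = text.splitlines()
--     header: list[str] = []
--     domains: set[str] = set()
--     saw_first_domain = False
--     for idx, raw in enumerate(lines):
--         if not saw_first_domain and _is_header_line(raw):
--             if idx == 0:
--                 # Drop the existing pin; the caller writes a fresh one.
--                 continue
--             header.append(raw)
--             continue
--         saw_first_domain = True
--         cleaned = raw.strip().lower()
--         if cleaned:
--             domains.add(cleaned)
--     return header, domains
-- ===== SOURCE B (Python) =====
-- def _is_header_line(line: str) -> bool: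
--     stripped = line.strip()
--     return stripped == "" or stripped.startswith("#")
--
--
-- def _split_header_and_domains(text: str) -> tuple[list[str], set[str]]:
--     """Split an existing file into (header_lines, domain_set).
--
--     Index-find decomposition: locate the first non-header line, slice the
--     header out verbatim (dropping line 0, the date pin), and build the
--     domain set from everything after the split in one comprehension.
--     """
--     lines = text.splitlines()
--     split = next((i for i, l in enumerate(lines) if not _is_header_line(l)), len(lines))
--     header = lines[1:split]
--     domains = {l.strip().lower() for l in lines[split:] if l.strip()}
--     return header, domains
-- ===== Notes on version B (the rewrite author's own statement) =====
-- stated objective: simpler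
-- what changed: Replaces A's single loop threading a saw_first_domain flag and an idx==0 special case with an index-find of the first non-header line followed by two slice passes: header = lines[1:split] and a set comprehension over lines[split:].
import Mathlib
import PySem

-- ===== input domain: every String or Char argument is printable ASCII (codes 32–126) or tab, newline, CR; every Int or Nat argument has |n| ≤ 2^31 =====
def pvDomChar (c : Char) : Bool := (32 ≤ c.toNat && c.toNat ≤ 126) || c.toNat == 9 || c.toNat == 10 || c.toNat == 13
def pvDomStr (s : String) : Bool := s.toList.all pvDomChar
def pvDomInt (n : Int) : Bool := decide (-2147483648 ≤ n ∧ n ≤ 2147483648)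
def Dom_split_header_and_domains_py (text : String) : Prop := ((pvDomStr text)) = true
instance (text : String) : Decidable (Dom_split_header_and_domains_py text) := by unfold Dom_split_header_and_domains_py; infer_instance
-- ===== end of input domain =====

-- B replaces A's flag-threaded single loop by an index-find plus two slice passes (same cost, simpler decomposition); equivalence is proved on all inputs.

-- ===== PORT A =====
-- shared helper: port of _is_header_line (both Pythons use the identical helper)
def pyIsHeaderLine (line : String) : Bool :=
  let stripped := PySem.Str.strip line
  stripped == "" || PySem.Str.startswith stripped "#"

-- the loop body of A, one step of the fold over enumerate(lines)
def pvStepA (st : List String × PySem.Set String × Bool) (p : Int × String) :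
    List String × PySem.Set String × Bool :=
  if !st.2.2 && pyIsHeaderLine p.2 then
    if p.1 == 0 then st
    else (st.1 ++ [p.2], st.2.1, st.2.2)
  else
    let cleaned := PySem.Str.lower (PySem.Str.strip p.2)
    if cleaned ≠ "" then (st.1, PySem.Set.add st.2.1 cleaned, true)
    else (st.1, st.2.1, true)

def split_header_and_domains_py (text : String) : List String × List String :=
  let lines := PySem.Str.splitlines text
  let st := (PySem.List.enumerate lines 0).foldl pvStepA ([], PySem.Set.empty, false)
  (st.1, st.2.1)

-- ===== PORT B =====
def split_header_and_domains_py_alt (text : String) : List String × List String :=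
  let lines := PySem.Str.splitlines text
  let split := (lines.findIdx? (fun l => !pyIsHeaderLine l)).getD lines.length
  let header := PySem.List.slice lines (some 1) (some (split : Int))
  let domains := PySem.Set.ofList
    ((PySem.List.slice lines (some (split : Int)) none).filterMap
      (fun l => if PySem.Str.strip l ≠ "" then some (PySem.Str.lower (PySem.Str.strip l)) else none))
  (header, domains)

-- ===== PRECONDITION & SPEC =====
def Spec_split_header_and_domains_py (text : String) (out : List String × List String) : Prop := out = split_header_and_domains_py_alt text
instance (text : String) (out : List String × List String) : Decidable (Spec_split_header_and_domains_py text out) := by unfold Spec_split_header_and_domains_py; infer_instance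

-- ===== CLAIM (what is proved, stated in full; the proofs are below) =====
def Claim_equal_split_header_and_domains_py : Prop := ∀ (text : String), Dom_split_header_and_domains_py text → Spec_split_header_and_domains_py text (split_header_and_domains_py text)

-- ===== LEMMAS AND PROOFS =====

-- the cleaned non-empty lines, in order (A's condition `if cleaned:`)
def pvClean (l : List String) : List String :=
  l.filterMap (fun s =>
    if PySem.Str.lower (PySem.Str.strip s) ≠ "" then some (PySem.Str.lower (PySem.Str.strip s)) else none)

theorem pvClean_cons (x : String) (l : List String) :
    pvClean (x :: l) = if PySem.Str.lower (PySem.Str.strip x) = "" then pvClean l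
      else PySem.Str.lower (PySem.Str.strip x) :: pvClean l := by
  by_cases hc : PySem.Str.lower (PySem.Str.strip x) = "" <;> simp [pvClean, hc]

theorem pv_lower_empty (t : String) : (PySem.Str.lower t = "") ↔ (t = "") := by
  rw [← String.toList_eq_nil_iff, ← String.toList_eq_nil_iff]
  simp [PySem.Str.toList_lower, PySem.Chars.lower]

-- B's comprehension condition (`if l.strip()`) produces the same list
theorem pv_clean_eq (l : List String) :
    l.filterMap (fun s => if PySem.Str.strip s ≠ "" then some (PySem.Str.lower (PySem.Str.strip s)) else none)
      = pvClean l := by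
  unfold pvClean
  apply List.filterMap_congr
  intro s _
  by_cases h : PySem.Str.strip s = "" <;>
    simp [h, (pv_lower_empty (PySem.Str.strip s)).not, pv_lower_empty]

-- phase 2: once saw_first_domain is true, the loop only accumulates cleaned lines
theorem pv_phase2 (xs : List String) (i : Int) (h : List String) (d : PySem.Set String) :
    (PySem.List.enumerate xs i).foldl pvStepA (h, d, true)
      = (h, (pvClean xs).foldl PySem.Set.add d, true) := by
  induction xs generalizing i d with
  | nil => simp [PySem.List.enumerate_nil, pvClean]
  | cons x xs ih =>
    rw [PySem.List.enumerate_cons]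
    by_cases hc : PySem.Str.lower (PySem.Str.strip x) = "" <;>
      simp [List.foldl_cons, pvStepA, hc, pvClean_cons, ih]

def pvSplitIdx (xs : List String) : Nat :=
  (xs.findIdx? (fun l => !pyIsHeaderLine l)).getD xs.length

-- phase 1: with the flag still false and a positive index, the loop collects the
-- header prefix verbatim, then switches to phase 2 at the first non-header line
theorem pv_phase1 (xs : List String) (i : Int) (hi : 0 < i) (h : List String) :
    ((PySem.List.enumerate xs i).foldl pvStepA (h, PySem.Set.empty, false)).1
        = h ++ xs.take (pvSplitIdx xs)
    ∧ ((PySem.List.enumerate xs i).foldl pvStepA (h, PySem.Set.empty, false)).2.1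
        = (pvClean (xs.drop (pvSplitIdx xs))).foldl PySem.Set.add PySem.Set.empty := by
  induction xs generalizing i h with
  | nil => simp [PySem.List.enumerate_nil, pvSplitIdx, pvClean]
  | cons x xs ih =>
    rw [PySem.List.enumerate_cons]
    by_cases hx : pyIsHeaderLine x = true
    · have hne : (i == 0) = false := by simp; omega
      have hsplit : pvSplitIdx (x :: xs) = pvSplitIdx xs + 1 := by
        unfold pvSplitIdx
        rw [List.findIdx?_cons]
        cases xs.findIdx? (fun l => !pyIsHeaderLine l) <;> simp [hx]
      rcases ih (i + 1) (by omega) (h ++ [x]) with ⟨ih1, ih2⟩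
      have hstep : pvStepA (h, PySem.Set.empty, false) (i, x) = (h ++ [x], PySem.Set.empty, false) := by
        simp [pvStepA, hx, hne]
      rw [List.foldl_cons, hstep]
      refine ⟨?_, ?_⟩
      · rw [ih1, hsplit]; simp [List.take_succ_cons]
      · rw [ih2, hsplit]; simp [List.drop_succ_cons]
    · have hx' : pyIsHeaderLine x = false := by simpa using hx
      have hsplit : pvSplitIdx (x :: xs) = 0 := by
        unfold pvSplitIdx; rw [List.findIdx?_cons]; simp [hx']
      rw [List.foldl_cons, hsplit]
      by_cases hc : PySem.Str.lower (PySem.Str.strip x) = "" <;>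
        simp [pvStepA, hx', hc, pv_phase2, pvClean_cons]

-- ===== VERDICT (by name: the statement is the Claim_ definition above) =====
theorem split_header_and_domains_py_spec : Claim_equal_split_header_and_domains_py := by
  unfold Claim_equal_split_header_and_domains_py
  intro text _
  unfold Spec_split_header_and_domains_py split_header_and_domains_py split_header_and_domains_py_alt
  simp only []
  cases hL : PySem.Str.splitlines text with
  | nil => simp [PySem.List.enumerate_nil, PySem.List.slice]
  | cons x xs =>
    rw [PySem.List.enumerate_cons, List.foldl_cons]
    rw [show ((x :: xs).findIdx? (fun l => !pyIsHeaderLine l)).getD (x :: xs).length = pvSplitIdx (x :: xs) from rfl]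
    by_cases hx : pyIsHeaderLine x = true
    · -- line 0 is a header line: it is dropped, phase 1 continues at index 1
      have hsplit : pvSplitIdx (x :: xs) = pvSplitIdx xs + 1 := by
        unfold pvSplitIdx
        rw [List.findIdx?_cons]
        cases xs.findIdx? (fun l => !pyIsHeaderLine l) <;> simp [hx]
      have hstep : pvStepA ([], PySem.Set.empty, false) ((0 : Int), x) = ([], PySem.Set.empty, false) := by
        simp [pvStepA, hx]
      rw [hstep]
      rcases pv_phase1 xs (0 + 1) (by omega) [] with ⟨h1, h2⟩
      rw [Prod.ext_iff]
      constructor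
      · rw [h1, hsplit]
        rw [show ((pvSplitIdx xs + 1 : Nat) : Int) = ((pvSplitIdx xs : Nat) : Int) + 1 by push_cast; ring]
        rw [show ((1:Int)) = ((1:Nat) : Int) by norm_num] at *
        rw [show ((pvSplitIdx xs : Nat) : Int) + ((1:Nat) : Int) = (((1 + pvSplitIdx xs : Nat)) : Int) by push_cast; ring]
        rw [PySem.List.slice_natCast]
        simp
      · rw [h2, hsplit]
        rw [show ((pvSplitIdx xs + 1 : Nat) : Int) = (((pvSplitIdx xs + 1 : Nat)) : Int) from rfl]
        rw [PySem.List.slice_from_natCast]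
        simp only [List.drop_succ_cons]
        rw [pv_clean_eq, PySem.Set.ofList_eq_foldl]
        rfl
    · -- line 0 is already a domain: header is empty, every line feeds the set
      have hx' : pyIsHeaderLine x = false := by simpa using hx
      have hsplit : pvSplitIdx (x :: xs) = 0 := by
        unfold pvSplitIdx; rw [List.findIdx?_cons]; simp [hx']
      rw [hsplit]
      rw [show ((0:Nat) : Int) = (0:Int) from rfl]
      rw [Prod.ext_iff]
      constructor
      · by_cases hc : PySem.Str.lower (PySem.Str.strip x) = "" <;>
          simp [pvStepA, hx', hc, pv_phase2, PySem.List.slice]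
      · rw [show PySem.List.slice (x :: xs) (some 0) none = x :: xs by simp [PySem.List.slice]]
        rw [pv_clean_eq, PySem.Set.ofList_eq_foldl]
        by_cases hc : PySem.Str.lower (PySem.Str.strip x) = "" <;>
          simp [pvStepA, hx', hc, pv_phase2, pvClean_cons, PySem.Set.empty]
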